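-- pv_equiv track=rewrite | github.com/mehrdadhalali/Advent-Of-Code | 2025/day_2.py | is_id_invalid_2
-- ===== SOURCE A (Python) =====
-- def is_id_invalid_2(id_num: int) -> bool:
--     """Is the ID invalid according to part 2?"""
--
--     num_str = str(id_num)
--     length = len(num_str)
--     for i in range(1, length):
--         if length % i != 0:
--             continue
--         substring = num_str[:i]
--         if num_str.count(substring) == length // len(substring):
--             return True
--
--     return False
-- ===== SOURCE B (Python) =====
-- def is_id_invalid_2(id_num: int) -> bool:
--     """Is the ID invalid according to part 2?"""
--     s = str(id_num)
--     return len(s) > 1 and (s + s).find(s, 1) < len(s)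
-- ===== Notes on version B (the rewrite author's own statement) =====
-- stated objective: simpler
-- what changed: Replaces the divisor loop with prefix-count tests by the classic string-doubling periodicity test: s is a repetition of a proper prefix iff s reoccurs in s+s before index len(s).
import Mathlib
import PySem

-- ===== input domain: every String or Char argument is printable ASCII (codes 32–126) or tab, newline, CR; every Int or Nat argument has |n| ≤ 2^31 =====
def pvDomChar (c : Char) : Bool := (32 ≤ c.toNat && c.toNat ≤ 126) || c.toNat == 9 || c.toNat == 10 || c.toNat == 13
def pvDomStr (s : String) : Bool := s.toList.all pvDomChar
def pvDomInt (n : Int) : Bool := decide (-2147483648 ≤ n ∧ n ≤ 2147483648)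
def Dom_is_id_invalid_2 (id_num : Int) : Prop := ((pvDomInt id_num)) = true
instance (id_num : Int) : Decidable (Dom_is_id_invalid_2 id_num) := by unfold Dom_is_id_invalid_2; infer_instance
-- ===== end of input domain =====

-- B replaces A's divisor loop with count tests by the string-doubling periodicity test (simpler, same result).

-- ===== PORT A =====
def is_id_invalid_2 (id_num : Int) : Bool :=
  let num_str := PySem.Int.toStr id_num
  let length := PySem.Str.len num_str
  (PySem.List.pyRange 1 length 1).any (fun i =>
    if PySem.Int.mod length i != 0 then false
    else
      let substring := PySem.Str.slice num_str none (some i)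
      ((PySem.Str.count num_str substring : Int) == PySem.Int.floordiv length (PySem.Str.len substring)))

-- ===== PORT B =====
def is_id_invalid_2_alt (id_num : Int) : Bool :=
  let s := PySem.Int.toStr id_num
  decide (1 < PySem.Str.len s) && decide (PySem.Str.findFrom (s ++ s) s 1 < PySem.Str.len s)

-- ===== PRECONDITION & SPEC =====
def Spec_is_id_invalid_2 (id_num : Int) (out : Bool) : Prop := out = is_id_invalid_2_alt id_num
instance (id_num : Int) (out : Bool) : Decidable (Spec_is_id_invalid_2 id_num out) := by unfold Spec_is_id_invalid_2; infer_instance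

-- ===== CLAIM (what is proved, stated in full; the proofs are below) =====
def Claim_equal_is_id_invalid_2 : Prop := ∀ (id_num : Int), Dom_is_id_invalid_2 id_num → Spec_is_id_invalid_2 id_num (is_id_invalid_2 id_num)

-- ===== LEMMAS AND PROOFS =====

-- t repeated k times
def powT (k : Nat) (t : List Char) : List Char := (List.replicate k t).flatten

theorem powT_succ (k : Nat) (t : List Char) : powT (k+1) t = t ++ powT k t := by
  simp [powT, List.replicate_succ]

theorem powT_add (a b : Nat) (t : List Char) : powT (a+b) t = powT a t ++ powT b t := by
  rw [powT, powT, powT, List.replicate_add, List.flatten_append]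

theorem length_powT (k : Nat) (t : List Char) : (powT k t).length = k * t.length := by
  simp [powT]

theorem getElem_powT (t : List Char) (k j : Nat) (hj : j < (powT k t).length)
    (ht : 0 < t.length) :
    (powT k t)[j] = t[j % t.length]'(Nat.mod_lt _ ht) := by
  induction k generalizing j with
  | zero => simp [powT] at hj
  | succ k ih =>
    rw [List.getElem_of_eq (powT_succ k t)]
    rw [powT_succ] at hj
    by_cases hlt : j < t.length
    · rw [List.getElem_append_left hlt]
      congr 1
      exact (Nat.mod_eq_of_lt hlt).symm
    · push_neg at hlt
      rw [List.getElem_append_right hlt]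
      rw [ih (j - t.length) (by simp at hj ⊢; omega)]
      congr 1
      conv_rhs => rw [show j = t.length + (j - t.length) by omega]
      rw [Nat.add_mod_left]

-- ---- count characterisation ----

-- go with enough fuel, as a standalone count
def cnt (t l : List Char) : Nat := PySem.Chars.count.go t l.length l 0

theorem go_nil (t : List Char) (fuel acc : Nat) :
    PySem.Chars.count.go t fuel [] acc = acc := by
  cases fuel <;> rfl

theorem go_cons (t : List Char) (fuel : Nat) (h : Char) (tl : List Char) (acc : Nat) :
    PySem.Chars.count.go t (fuel+1) (h::tl) acc =
      if t.isPrefixOf (h::tl) then PySem.Chars.count.go t fuel (List.drop t.length (h::tl)) (acc+1)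
      else PySem.Chars.count.go t fuel tl acc := by
  rfl

theorem cnt_nil (t : List Char) : cnt t [] = 0 := by
  simp [cnt, go_nil]

theorem go_norm (t : List Char) (ht : 0 < t.length) :
    ∀ (fuel : Nat) (l : List Char) (acc : Nat), l.length ≤ fuel →
      PySem.Chars.count.go t fuel l acc = acc + cnt t l := by
  intro fuel
  induction fuel using Nat.strong_induction_on with
  | _ fuel ih =>
    intro l acc hle
    cases l with
    | nil => simp [go_nil, cnt_nil]
    | cons h tl =>
      cases fuel with
      | zero => simp at hle
      | succ fuel =>
      simp only [List.length_cons] at hle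
      have hRHS : cnt t (h :: tl) =
          if t.isPrefixOf (h :: tl) then
            PySem.Chars.count.go t tl.length (List.drop t.length (h :: tl)) (0+1)
          else PySem.Chars.count.go t tl.length tl 0 := by
        simp only [cnt, List.length_cons]
        rw [go_cons]
      rw [go_cons, hRHS]
      by_cases hpre : t.isPrefixOf (h :: tl)
      · simp only [hpre, if_true]
        have hpl : t.length ≤ tl.length + 1 :=
          (List.isPrefixOf_iff_prefix.mp hpre).length_le
        have hdl : (List.drop t.length (h :: tl)).length ≤ fuel := by
          simp only [List.length_drop, List.length_cons]; omega
        have hdl2 : (List.drop t.length (h :: tl)).length ≤ tl.length := by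
          simp only [List.length_drop, List.length_cons]; omega
        rw [ih fuel (by omega) _ _ hdl, ih tl.length (by omega) _ _ hdl2]
        omega
      · simp only [hpre, Bool.false_eq_true, if_false]
        rw [ih fuel (by omega) _ _ (by omega), ih tl.length (by omega) _ _ (le_refl _)]
        omega

theorem cnt_cons (t : List Char) (ht : 0 < t.length) (h : Char) (tl : List Char) :
    cnt t (h::tl) =
      if t.isPrefixOf (h::tl) then cnt t (List.drop t.length (h::tl)) + 1
      else cnt t tl := by
  have hRHS : cnt t (h :: tl) =
      if t.isPrefixOf (h :: tl) then
        PySem.Chars.count.go t tl.length (List.drop t.length (h :: tl)) (0+1)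
      else PySem.Chars.count.go t tl.length tl 0 := by
    simp only [cnt, List.length_cons]
    rw [go_cons]
  rw [hRHS]
  by_cases hpre : t.isPrefixOf (h :: tl)
  · simp only [hpre, if_true]
    have hpl : t.length ≤ tl.length + 1 :=
      (List.isPrefixOf_iff_prefix.mp hpre).length_le
    rw [go_norm t ht _ _ _ (by simp only [List.length_drop, List.length_cons]; omega)]
    omega
  · simp only [hpre, Bool.false_eq_true, if_false]
    rw [go_norm t ht _ _ _ (le_refl _)]
    omega

theorem count_eq_cnt (l t : List Char) (ht : 0 < t.length) :
    PySem.Chars.count l t = cnt t l := by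
  rw [PySem.Chars.count, cnt]
  have : t.isEmpty = false := by
    cases t with
    | nil => simp at ht
    | cons a b => rfl
  rw [this]
  rfl

theorem cnt_powT (t : List Char) (ht : 0 < t.length) (k : Nat) :
    cnt t (powT k t) = k := by
  induction k with
  | zero => simp [powT, cnt_nil]
  | succ k ih =>
    obtain ⟨c, cs, rfl⟩ := List.exists_cons_of_ne_nil (List.ne_nil_of_length_pos ht)
    rw [powT_succ]
    rw [show (c :: cs) ++ powT k (c :: cs) = c :: (cs ++ powT k (c :: cs)) by rfl]
    rw [cnt_cons _ ht]
    have hpre : (c :: cs).isPrefixOf (c :: (cs ++ powT k (c :: cs))) := by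
      rw [List.isPrefixOf_iff_prefix]
      exact ⟨powT k (c :: cs), by simp⟩
    rw [if_pos hpre]
    rw [show c :: (cs ++ powT k (c :: cs)) = (c :: cs) ++ powT k (c :: cs) by rfl]
    rw [List.drop_left, ih]

theorem cnt_mul_le (t : List Char) (ht : 0 < t.length) :
    ∀ (n : Nat) (l : List Char), l.length ≤ n → cnt t l * t.length ≤ l.length := by
  intro n
  induction n with
  | zero =>
    intro l hle
    have : l = [] := List.eq_nil_of_length_eq_zero (by omega)
    subst this; simp [cnt_nil]
  | succ n ih =>
    intro l hle
    match l with
    | [] => simp [cnt_nil]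
    | h :: tl =>
      rw [cnt_cons _ ht]
      by_cases hpre : t.isPrefixOf (h :: tl)
      · simp only [hpre, if_true]
        have hpl : t.length ≤ tl.length + 1 :=
          (List.isPrefixOf_iff_prefix.mp hpre).length_le
        have hdl := ih (List.drop t.length (h :: tl))
          (by simp only [List.length_drop, List.length_cons] at *; omega)
        simp only [List.length_drop, List.length_cons] at *
        rw [Nat.add_mul, Nat.one_mul]
        omega
      · simp only [hpre, Bool.false_eq_true, if_false, List.length_cons]
        have := ih tl (by simp at hle; omega)
        omega

theorem cnt_exact (t : List Char) (ht : 0 < t.length) :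
    ∀ (n : Nat) (l : List Char), l.length ≤ n →
      cnt t l * t.length = l.length → l = powT (cnt t l) t := by
  intro n
  induction n with
  | zero =>
    intro l hle _
    have : l = [] := List.eq_nil_of_length_eq_zero (by omega)
    subst this; simp [cnt_nil, powT]
  | succ n ih =>
    intro l hle heq
    match l with
    | [] => simp [cnt_nil, powT]
    | h :: tl =>
      rw [cnt_cons _ ht] at heq ⊢
      by_cases hpre : t.isPrefixOf (h :: tl)
      · simp only [hpre, if_true] at heq ⊢
        obtain ⟨r, hr⟩ := List.isPrefixOf_iff_prefix.mp hpre
        have hdrop : List.drop t.length (h :: tl) = r := by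
          rw [← hr, List.drop_left]
        rw [hdrop] at heq ⊢
        have hlen : (h :: tl).length = t.length + r.length := by
          rw [← hr]; simp
        have hr_eq : cnt t r * t.length = r.length := by
          rw [Nat.add_mul, Nat.one_mul] at heq
          omega
        have hrle : r.length ≤ n := by
          simp only [List.length_cons] at hle hlen
          omega
        have := ih r hrle hr_eq
        rw [powT_succ, ← hr]
        exact congrArg (fun x => t ++ x) this
      · simp only [hpre, Bool.false_eq_true, if_false] at heq ⊢
        exfalso
        have h1 := cnt_mul_le t ht tl.length tl (le_refl _)
        simp only [List.length_cons] at heq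
        omega

theorem count_eq_iff_powT (l t : List Char) (ht : 0 < t.length) (k : Nat)
    (hk : k * t.length = l.length) :
    PySem.Chars.count l t = k ↔ l = powT k t := by
  rw [count_eq_cnt l t ht]
  constructor
  · intro hc
    have := cnt_exact t ht l.length l (le_refl _) (by rw [hc, hk])
    rw [← hc]; exact this
  · intro hp
    rw [hp, cnt_powT t ht]

-- ---- cyclic-period machinery ----

theorem getElem_idx_congr (l : List Char) {i j : Nat} (h : i = j) (hi : i < l.length) :
    l[i] = l[j]'(h ▸ hi) := by
  subst h; rfl

def Cyc (l : List Char) (p : Nat) : Prop :=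
  ∀ j (hj : j < l.length), l[j] = l[(j + p) % l.length]'(Nat.mod_lt _ (Nat.zero_lt_of_lt hj))

theorem prefix_drop_cyc (l : List Char) (p : Nat) (hp1 : 1 ≤ p) (hpL : p < l.length)
    (h : l <+: (l ++ l).drop p) : Cyc l p := by
  intro j hj
  have e1 : l[j] = ((l ++ l).drop p)[j]'(by
      simp only [List.length_drop, List.length_append]; omega) := List.IsPrefix.getElem h hj
  rw [e1, List.getElem_drop, List.getElem_append]
  split_ifs with hcase
  · exact getElem_idx_congr l
      (show p + j = (j + p) % l.length by rw [Nat.mod_eq_of_lt (by omega)]; omega) _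
  · have hidx : p + j - l.length = (j + p) % l.length := by
      have h2L : j + p < 2 * l.length := by omega
      rw [Nat.mod_eq_sub_mod (by omega), Nat.mod_eq_of_lt (by omega)]
      omega
    exact getElem_idx_congr l hidx _

theorem cyc_iter (l : List Char) (p : Nat) (hc : Cyc l p) :
    ∀ (m : Nat) (j : Nat) (hj : j < l.length),
      l[j] = l[(j + m * p) % l.length]'(Nat.mod_lt _ (Nat.zero_lt_of_lt hj)) := by
  intro m
  induction m with
  | zero =>
    intro j hj
    exact getElem_idx_congr l
      (show j = (j + 0 * p) % l.length by
        rw [Nat.zero_mul, Nat.add_zero, Nat.mod_eq_of_lt hj]) _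
  | succ m ih =>
    intro j hj
    have h1 := ih j hj
    have h2 := hc ((j + m * p) % l.length) (Nat.mod_lt _ (Nat.zero_lt_of_lt hj))
    rw [h1, h2]
    refine getElem_idx_congr l ?_ _
    rw [Nat.mod_add_mod]
    congr 1
    ring

theorem gcd_reachable (p L : Nat) (hp : 0 < p) (hpL : p < L) :
    ∃ m : Nat, (m * p) % L = Nat.gcd p L := by
  refine ⟨((Nat.gcdA p L) % (L : ℤ)).toNat, ?_⟩
  have hLz : (L : ℤ) ≠ 0 := by exact_mod_cast (by omega : L ≠ 0)
  have hnn : 0 ≤ Nat.gcdA p L % (L : ℤ) := Int.emod_nonneg _ hLz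
  have hmz : (((Nat.gcdA p L % (L : ℤ)).toNat : ℕ) : ℤ) = Nat.gcdA p L % (L : ℤ) :=
    Int.toNat_of_nonneg hnn
  have hd : (Nat.gcd p L : ℤ) = p * Nat.gcdA p L + L * Nat.gcdB p L := Nat.gcd_eq_gcd_ab p L
  have hgle : Nat.gcd p L < L := lt_of_le_of_lt (Nat.gcd_le_left L hp) hpL
  have key : ((((Nat.gcdA p L % (L : ℤ)).toNat * p) % L : ℕ) : ℤ) = (Nat.gcd p L : ℤ) := by
    push_cast
    rw [hmz]
    calc (Nat.gcdA p L % (L : ℤ)) * p % L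
        = Nat.gcdA p L % (L : ℤ) % L * ((p : ℤ) % L) % L := Int.mul_emod _ _ _
      _ = Nat.gcdA p L % (L : ℤ) * ((p : ℤ) % L) % L := by rw [Int.emod_emod_of_dvd _ dvd_rfl]
      _ = Nat.gcdA p L * (p : ℤ) % L := (Int.mul_emod _ _ _).symm
      _ = ((Nat.gcd p L : ℤ) + (L : ℤ) * (- Nat.gcdB p L)) % L := by congr 1; rw [hd]; ring
      _ = (Nat.gcd p L : ℤ) % L := by rw [Int.add_mul_emod_self_left]
      _ = (Nat.gcd p L : ℤ) :=
            Int.emod_eq_of_lt (by positivity) (by exact_mod_cast hgle)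
  exact_mod_cast key

theorem cyc_gcd (l : List Char) (p : Nat) (hp : 0 < p) (hpL : p < l.length)
    (hc : Cyc l p) : Cyc l (Nat.gcd p l.length) := by
  intro j hj
  obtain ⟨m, hm⟩ := gcd_reachable p l.length hp hpL
  have hgle : Nat.gcd p l.length < l.length := lt_of_le_of_lt (Nat.gcd_le_left _ hp) hpL
  have h1 := cyc_iter l p hc m j hj
  rw [h1]
  refine getElem_idx_congr l ?_ _
  conv_lhs => rw [Nat.add_mod, hm]
  conv_rhs => rw [Nat.add_mod, Nat.mod_eq_of_lt hgle]

theorem cyc_mod (l : List Char) (d : Nat) (hd : 0 < d) (hdvd : d ∣ l.length)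
    (hc : Cyc l d) :
    ∀ j (hj : j < l.length), l[j] = l[j % d]'(Nat.lt_of_lt_of_le (Nat.mod_lt _ hd) (Nat.le_of_dvd (Nat.zero_lt_of_lt hj) hdvd)) := by
  intro j
  induction j using Nat.strong_induction_on with
  | _ j ih =>
    intro hj
    by_cases hlt : j < d
    · exact getElem_idx_congr l (Nat.mod_eq_of_lt hlt).symm _
    · push_neg at hlt
      have hj' : j - d < l.length := by omega
      have h1 := hc (j - d) hj'
      have hidx : (j - d + d) % l.length = j := by
        rw [Nat.sub_add_cancel hlt]
        exact Nat.mod_eq_of_lt hj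
      have h2 : l[j - d]'hj' = l[j]'hj := h1.trans (getElem_idx_congr l hidx _)
      have h3 := ih (j - d) (by omega) hj'
      have hidx2 : (j - d) % d = j % d := by
        conv_rhs => rw [show j = j - d + d from (Nat.sub_add_cancel hlt).symm]
        rw [Nat.add_mod_right]
      rw [← h2, h3]
      exact getElem_idx_congr l hidx2 _

theorem cyc_powT (l : List Char) (d : Nat) (hd : 0 < d) (hdL : d < l.length)
    (hdvd : d ∣ l.length) (hc : Cyc l d) :
    l = powT (l.length / d) (List.take d l) := by
  have hlen_take : (List.take d l).length = d := by
    rw [List.length_take]; omega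
  apply List.ext_getElem
  · rw [length_powT, hlen_take]
    exact (Nat.div_mul_cancel hdvd).symm
  · intro j h1 h2
    rw [getElem_powT (List.take d l) (l.length / d) j h2 (by rw [hlen_take]; exact hd),
        List.getElem_take]
    exact (cyc_mod l d hd hdvd hc j h1).trans (getElem_idx_congr l (by rw [hlen_take]) _)

theorem powT_prefix_drop (l t : List Char) (k : Nat) (ht : 0 < t.length) (hk : 2 ≤ k)
    (hl : l = powT k t) : l <+: (l ++ l).drop t.length := by
  subst hl
  have hkk : k = (k - 1) + 1 := by omega
  have hlen : t.length ≤ (powT k t).length := by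
    rw [length_powT]
    calc t.length = 1 * t.length := (Nat.one_mul _).symm
      _ ≤ k * t.length := Nat.mul_le_mul_right _ (by omega)
  rw [List.drop_append_of_le_length hlen]
  have hdrop : List.drop t.length (powT k t) = powT (k - 1) t := by
    conv_lhs => rw [hkk, powT_succ]
    exact List.drop_left
  rw [hdrop]
  have hcomm : powT (k - 1) t ++ powT k t = powT k t ++ powT (k - 1) t := by
    rw [← powT_add, ← powT_add, Nat.add_comm]
  rw [hcomm]
  exact List.prefix_append _ _

-- the pivot predicate: l reoccurs in l++l at some shift in [1, len)
def Pivot (l : List Char) : Prop :=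
  ∃ p : Nat, 1 ≤ p ∧ p < l.length ∧ l <+: (l ++ l).drop p

-- divisor form ↔ pivot
theorem div_form_iff_pivot (l : List Char) :
    (∃ i : Nat, 1 ≤ i ∧ i < l.length ∧ i ∣ l.length ∧ l = powT (l.length / i) (List.take i l)) ↔ Pivot l := by
  constructor
  · rintro ⟨i, h1, h2, h3, h4⟩
    have hti : (List.take i l).length = i := by rw [List.length_take]; omega
    have hkm : l.length / i * i = l.length := Nat.div_mul_cancel h3
    have hk2 : 2 ≤ l.length / i := by
      by_contra hlt
      push_neg at hlt
      have : l.length / i * i ≤ 1 * i := Nat.mul_le_mul_right _ (by omega)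
      omega
    have hp := powT_prefix_drop l (List.take i l) (l.length / i) (by omega) hk2 h4
    rw [hti] at hp
    exact ⟨i, h1, h2, hp⟩
  · rintro ⟨p, hp1, hpL, hpre⟩
    have hc := prefix_drop_cyc l p hp1 hpL hpre
    have hcg := cyc_gcd l p (by omega) hpL hc
    have hdpos : 0 < Nat.gcd p l.length := Nat.gcd_pos_of_pos_left _ (by omega)
    have hdvd : Nat.gcd p l.length ∣ l.length := Nat.gcd_dvd_right p l.length
    have hdle : Nat.gcd p l.length ≤ p := Nat.gcd_le_left _ (by omega)
    exact ⟨Nat.gcd p l.length, by omega, by omega, hdvd,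
      cyc_powT l _ hdpos (by omega) hdvd hcg⟩

theorem A_iff (id_num : Int) :
    is_id_invalid_2 id_num = true ↔
      (∃ i : Nat, 1 ≤ i ∧ i < (PySem.Int.toChars id_num).length ∧ i ∣ (PySem.Int.toChars id_num).length ∧
        PySem.Int.toChars id_num = powT ((PySem.Int.toChars id_num).length / i) (List.take i (PySem.Int.toChars id_num))) := by
  simp only [is_id_invalid_2, List.any_eq_true, PySem.Str.len_eq, PySem.Int.toList_toStr,
    PySem.Str.count_eq, PySem.Str.toList_slice, PySem.Chars.slice_eq_listSlice]
  constructor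
  · rintro ⟨i, hmem, hcond⟩
    rw [PySem.List.mem_pyRange_iff_of_pos (by norm_num)] at hmem
    obtain ⟨h1i, h2i, -⟩ := hmem
    lift i to ℕ using (by omega) with i'
    have h1 : 1 ≤ i' := by exact_mod_cast h1i
    have h2 : i' < (PySem.Int.toChars id_num).length := by exact_mod_cast h2i
    rw [PySem.List.slice_to_natCast _ i'] at hcond
    by_cases hd : i' ∣ (PySem.Int.toChars id_num).length
    · have hm0 : PySem.Int.mod ((PySem.Int.toChars id_num).length : ℤ) (i' : ℤ) = 0 :=
        (PySem.Int.mod_eq_zero_iff_dvd _ _).mpr (by exact_mod_cast hd)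
      rw [if_neg (by simp [hm0])] at hcond
      rw [beq_iff_eq] at hcond
      have hti : (List.take i' (PySem.Int.toChars id_num)).length = i' := by
        rw [List.length_take]; omega
      rw [hti, PySem.Int.floordiv_natCast] at hcond
      have hcnt : PySem.Chars.count (PySem.Int.toChars id_num) (List.take i' (PySem.Int.toChars id_num))
          = (PySem.Int.toChars id_num).length / i' := by exact_mod_cast hcond
      have hk : ((PySem.Int.toChars id_num).length / i') * (List.take i' (PySem.Int.toChars id_num)).length
          = (PySem.Int.toChars id_num).length := by
        rw [hti]; exact Nat.div_mul_cancel hd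
      exact ⟨i', h1, h2, hd, (count_eq_iff_powT _ _ (by rw [hti]; omega) _ hk).mp hcnt⟩
    · exfalso
      have hm0 : PySem.Int.mod ((PySem.Int.toChars id_num).length : ℤ) (i' : ℤ) ≠ 0 :=
        fun h => hd (by exact_mod_cast (PySem.Int.mod_eq_zero_iff_dvd _ _).mp h)
      rw [if_pos (bne_iff_ne.mpr hm0)] at hcond
      exact absurd hcond (by simp)
  · rintro ⟨i', h1, h2, hd, hpow⟩
    refine ⟨(i' : ℤ), ?_, ?_⟩
    · rw [PySem.List.mem_pyRange_iff_of_pos (by norm_num)]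
      exact ⟨by exact_mod_cast h1, by exact_mod_cast h2, one_dvd _⟩
    · rw [PySem.List.slice_to_natCast _ i']
      have hm0 : PySem.Int.mod ((PySem.Int.toChars id_num).length : ℤ) (i' : ℤ) = 0 :=
        (PySem.Int.mod_eq_zero_iff_dvd _ _).mpr (by exact_mod_cast hd)
      rw [if_neg (by simp [hm0])]
      have hti : (List.take i' (PySem.Int.toChars id_num)).length = i' := by
        rw [List.length_take]; omega
      have hk : ((PySem.Int.toChars id_num).length / i') * (List.take i' (PySem.Int.toChars id_num)).length
          = (PySem.Int.toChars id_num).length := by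
        rw [hti]; exact Nat.div_mul_cancel hd
      have hcnt := (count_eq_iff_powT _ _ (by rw [hti]; omega) _ hk).mpr hpow
      rw [hti, PySem.Int.floordiv_natCast]
      simp [hcnt]

theorem findFrom_lt_iff (l : List Char) (hL : 1 < l.length) :
    PySem.Chars.findFrom (l ++ l) l 1 < (l.length : ℤ) ↔ Pivot l := by
  have h1 : (1:ℕ) ≤ (l ++ l).length := by simp only [List.length_append]; omega
  have hrw := PySem.Chars.findFrom_natCast (l ++ l) l 1 h1
  rw [Nat.cast_one] at hrw
  have hinf : l <:+: (l ++ l).drop 1 := by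
    rw [List.drop_append_of_le_length (by omega)]
    exact (List.suffix_append _ _).isInfix
  have hne : PySem.Chars.find ((l ++ l).drop 1) l ≠ -1 :=
    (PySem.Chars.find_ne_neg_one_iff _ _).mpr hinf
  rw [hrw, if_neg hne]
  have hf0 : 0 ≤ PySem.Chars.find ((l ++ l).drop 1) l := by
    have := PySem.Chars.neg_one_le_find ((l ++ l).drop 1) l
    omega
  obtain ⟨hpre, hmin⟩ := PySem.Chars.find_spec hf0
  set f := PySem.Chars.find ((l ++ l).drop 1) l with hf
  have hfc : (f.toNat : ℤ) = f := Int.toNat_of_nonneg hf0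
  constructor
  · intro hlt
    refine ⟨1 + f.toNat, by omega, by omega, ?_⟩
    rw [List.drop_drop] at hpre
    exact hpre
  · rintro ⟨p, hp1, hpL, hpre'⟩
    have hple : f.toNat ≤ p - 1 := by
      by_contra hgt
      push_neg at hgt
      exact hmin (p - 1) (by omega)
        (by rw [List.drop_drop, show 1 + (p - 1) = p by omega]; exact hpre')
    omega

theorem B_iff (id_num : Int) :
    is_id_invalid_2_alt id_num = true ↔
      (1 < (PySem.Int.toChars id_num).length ∧ Pivot (PySem.Int.toChars id_num)) := by
  simp only [is_id_invalid_2_alt, Bool.and_eq_true, decide_eq_true_eq, PySem.Str.findFrom_eq,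
    String.toList_append, PySem.Str.len_eq, PySem.Int.toList_toStr]
  constructor
  · rintro ⟨h1, h2⟩
    have h1' : 1 < (PySem.Int.toChars id_num).length := by exact_mod_cast h1
    exact ⟨h1', (findFrom_lt_iff _ h1').mp h2⟩
  · rintro ⟨h1, h2⟩
    exact ⟨by exact_mod_cast h1, (findFrom_lt_iff _ h1).mpr h2⟩

-- ===== VERDICT (by name: the statement is the Claim_ definition above) =====
theorem is_id_invalid_2_spec : Claim_equal_is_id_invalid_2 := by
  intro id_num _
  unfold Spec_is_id_invalid_2
  rw [Bool.eq_iff_iff, A_iff, B_iff, ← div_form_iff_pivot]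
  constructor
  · rintro ⟨i, h1, h2, h3, h4⟩
    exact ⟨by omega, i, h1, h2, h3, h4⟩
  · rintro ⟨-, h⟩
    exact h
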